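-- pv_equiv track=rewrite | github.com/sav-alexey/codility | BinaryGap/binary_gap.py | solution
-- ===== SOURCE A (Python) =====
-- def solution(N):
--     cache = 0
--     gaps = []
--     bin_str = str(bin(N))[2:]
--     for num in bin_str:
--         if num == '0':
--             cache += 1
--         else:
--             gaps.append(cache)
--             cache = 0
--     return max(gaps)
-- ===== SOURCE B (Python) =====
-- def solution(N):
--     bin_str = str(bin(N))[2:]
--     idx = [i for i, c in enumerate(bin_str) if c != '0']
--     runs = [idx[0]] + [b - a - 1 for a, b in zip(idx, idx[1:])]
--     return max(runs)
-- ===== Notes on version B (the rewrite author's own statement) =====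
-- stated objective: alternative
-- what changed: Instead of a running zero-counter reset at every marker, B collects the indices of the non-'0' characters and reads each gap off as the difference of consecutive marker indices (idx[0] for the first), then takes the max.
-- outside the precondition, e.g. on solution(0): A raises ValueError, B raises IndexError
import Mathlib
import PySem

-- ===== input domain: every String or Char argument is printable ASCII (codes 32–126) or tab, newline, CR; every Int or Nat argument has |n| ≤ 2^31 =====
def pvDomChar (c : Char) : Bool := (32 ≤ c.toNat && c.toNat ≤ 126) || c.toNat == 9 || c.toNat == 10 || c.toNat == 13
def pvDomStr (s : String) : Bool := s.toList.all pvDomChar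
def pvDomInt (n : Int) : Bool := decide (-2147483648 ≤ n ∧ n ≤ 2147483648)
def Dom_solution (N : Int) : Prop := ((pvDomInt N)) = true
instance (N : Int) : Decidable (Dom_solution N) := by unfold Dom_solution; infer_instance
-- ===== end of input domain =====

-- B replaces A's running zero-counter with marker indices: gap = difference of consecutive
-- non-'0' positions (alternative decomposition, same cost).

-- ===== PORT A =====
def solution (N : Int) : Int :=
  let bin_str := PySem.List.slice (PySem.Int.toBinChars0b N) (some 2) none
  let st := bin_str.foldl
    (fun (st : Int × List Int) num =>
      if num = '0' then (st.1 + 1, st.2) else (0, st.2 ++ [st.1])) (0, [])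
  (PySem.List.max? st.2 (fun x => x)).getD 0   -- max(gaps); gaps = [] (ValueError) excluded by Pre_

-- ===== PORT B =====
def solution_alt (N : Int) : Int :=
  let bin_str := PySem.List.slice (PySem.Int.toBinChars0b N) (some 2) none
  let idx := (PySem.List.enumerate bin_str 0).filterMap
    (fun p => if p.2 ≠ '0' then some p.1 else none)
  let runs := [(PySem.List.pyGet? idx 0).getD 0]   -- idx[0]; idx = [] (IndexError) excluded by Pre_
    ++ (idx.zip (PySem.List.slice idx (some 1) none)).map (fun p => p.2 - p.1 - 1)
  (PySem.List.max? runs (fun x => x)).getD 0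

-- ===== PRECONDITION & SPEC =====
-- N = 0 is excluded: there bin(0)[2:] = "0" has no non-'0' marker, so A raises ValueError
-- (max of an empty list) and B raises IndexError (idx[0]).
def Pre_solution (N : Int) : Prop := N ≠ 0
instance (N : Int) : Decidable (Pre_solution N) := by unfold Pre_solution; infer_instance
def pvWitness_solution : Int := 9
def Spec_solution (N : Int) (out : Int) : Prop := out = solution_alt N
instance (N : Int) (out : Int) : Decidable (Spec_solution N out) := by unfold Spec_solution; infer_instance

-- ===== CLAIM (what is proved, stated in full; the proofs are below) =====
def Claim_equal_solution : Prop := ∀ (N : Int), Dom_solution N → Pre_solution N → Spec_solution N (solution N)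

-- ===== LEMMAS AND PROOFS =====

-- gap lengths before each marker, with `cache` zeros already pending
def gapsOf : List Char → Int → List Int
  | [], _ => []
  | c :: r, cache => if c = '0' then gapsOf r (cache + 1) else cache :: gapsOf r 0

-- indices (from offset k) of the non-'0' characters
def idxOf : List Char → Int → List Int
  | [], _ => []
  | c :: r, k => if c = '0' then idxOf r (k + 1) else k :: idxOf r (k + 1)

-- consecutive-difference runs, seeded with the previous marker position
def runsH : Int → List Int → List Int
  | _, [] => []
  | prev, i :: rest => (i - prev - 1) :: runsH i rest

theorem foldl_eq_gapsOf (s : List Char) : ∀ (c : Int) (g : List Int),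
    (s.foldl (fun (st : Int × List Int) num =>
      if num = '0' then (st.1 + 1, st.2) else (0, st.2 ++ [st.1])) (c, g)).2
    = g ++ gapsOf s c := by
  induction s with
  | nil => intro c g; simp [gapsOf]
  | cons x r ih =>
    intro c g
    by_cases hx : x = '0' <;> simp [gapsOf, hx, ih]

theorem filterMap_enumerate_eq_idxOf (s : List Char) : ∀ (k : Int),
    (PySem.List.enumerate s k).filterMap (fun p => if p.2 ≠ '0' then some p.1 else none)
    = idxOf s k := by
  induction s with
  | nil => intro k; simp [PySem.List.enumerate_nil, idxOf]
  | cons x r ih =>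
    intro k
    by_cases hx : x = '0' <;>
    · simp [PySem.List.enumerate_cons, idxOf, hx]
      simpa using ih (k + 1)

theorem runsH_idxOf (s : List Char) : ∀ (k prev : Int),
    runsH prev (idxOf s k) = gapsOf s (k - prev - 1) := by
  induction s with
  | nil => intro k prev; simp [idxOf, gapsOf, runsH]
  | cons x r ih =>
    intro k prev
    by_cases hx : x = '0'
    · have : k + 1 - prev - 1 = k - prev - 1 + 1 := by ring
      simp [idxOf, gapsOf, hx, ih, this]
    · simp [idxOf, gapsOf, hx, runsH, ih]

theorem runsH_eq_zip_map (rest : List Int) : ∀ (i0 : Int),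
    runsH i0 rest = ((i0 :: rest).zip rest).map (fun p => p.2 - p.1 - 1) := by
  induction rest with
  | nil => intro i0; simp [runsH]
  | cons j r ih => intro i0; simp [runsH, List.zip_cons_cons, ih]

theorem idxOf_nil_gapsOf (s : List Char) : ∀ (k c : Int),
    idxOf s k = [] → gapsOf s c = [] := by
  induction s with
  | nil => intro k c _; simp [gapsOf]
  | cons x r ih =>
    intro k c h
    by_cases hx : x = '0'
    · simp only [idxOf, hx] at h
      simp [gapsOf, hx, ih _ _ h]
    · simp [idxOf, hx] at h

-- ===== VERDICT (by name: the statement is the Claim_ definition above) =====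
theorem solution_spec : Claim_equal_solution := by
  intro N _ _
  unfold Spec_solution solution solution_alt
  simp only [foldl_eq_gapsOf, filterMap_enumerate_eq_idxOf, PySem.List.slice_from_one,
    List.nil_append]
  set s := PySem.List.slice (PySem.Int.toBinChars0b N) (some 2) none with hs
  cases hidx : idxOf s 0 with
  | nil =>
    rw [idxOf_nil_gapsOf s 0 0 hidx]
    simp [PySem.List.max?, PySem.List.pyGet?]
  | cons i0 rest =>
    have h1 : gapsOf s 0 = runsH (-1) (i0 :: rest) := by
      rw [← hidx, runsH_idxOf]; norm_num
    rw [h1, runsH]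
    simp only [PySem.List.pyGet?_zero_cons, Option.getD_some, List.tail_cons,
      ← runsH_eq_zip_map, List.cons_append, List.nil_append]
    norm_num
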